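-- pv_equiv track=rewrite | github.com/cmejo/AI_Scholar | backend/rl/safety/safety_monitor.py | _is_repetitive_response
-- ===== SOURCE A (Python) =====
-- from collections import deque, defaultdict
--
-- def _is_repetitive_response(response_text: str) -> bool:
--     """Check if response is repetitive."""
--
--     # Simple repetition detection
--     words = response_text.lower().split()
--
--     if len(words) < 10:
--         return False
--
--     # Check for repeated phrases
--     word_counts = defaultdict(int)
--     for word in words:
--         word_counts[word] += 1
--
--     # If any word appears more than 30% of the time, it's repetitive
--     max_count = max(word_counts.values())
--     repetition_ratio = max_count / len(words)
--
--     return repetition_ratio > 0.3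
-- ===== SOURCE B (Python) =====
-- def _is_repetitive_response(response_text: str) -> bool:
--     """Check if response is repetitive."""
--     words = response_text.lower().split()
--
--     if len(words) < 10:
--         return False
--
--     # Sort so equal words become adjacent, then scan runs of identical
--     # neighbours; the longest run length equals the highest word frequency.
--     words.sort()
--     best = cur = 1
--     for prev, w in zip(words, words[1:]):
--         if w == prev:
--             cur += 1
--         else:
--             cur = 1
--         if cur > best:
--             best = cur
--
--     return best / len(words) > 0.3
-- ===== Notes on version B (the rewrite author's own statement) =====
-- stated objective: alternative
-- what changed: Replaces the defaultdict frequency table and max over its values by sorting the words and scanning adjacent runs, taking the longest run length as the top frequency.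
import Mathlib
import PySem

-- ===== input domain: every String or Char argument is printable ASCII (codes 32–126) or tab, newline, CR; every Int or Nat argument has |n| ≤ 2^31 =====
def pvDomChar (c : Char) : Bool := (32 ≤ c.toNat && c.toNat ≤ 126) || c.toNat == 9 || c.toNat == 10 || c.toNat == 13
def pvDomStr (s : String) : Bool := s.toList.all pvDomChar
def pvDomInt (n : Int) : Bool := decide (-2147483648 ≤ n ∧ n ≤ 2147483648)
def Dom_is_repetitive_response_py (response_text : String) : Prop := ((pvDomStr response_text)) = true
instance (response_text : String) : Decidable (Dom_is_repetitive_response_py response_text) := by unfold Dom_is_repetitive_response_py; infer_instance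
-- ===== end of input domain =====

-- B replaces A's defaultdict frequency table by sort-then-adjacent-run-scan; equivalence of the RETURN value
-- (Source B sorts its local words list only). The float test `max_count / len(words) > 0.3` is ported exactly as
-- the integer comparison 10 * max_count > 3 * len(words) in both ports.

-- ===== PORT A =====
def is_repetitive_response_py (response_text : String) : Bool :=
  let words := PySem.Str.split₀ (PySem.Str.lower response_text)
  if words.length < 10 then false
  else
    let word_counts := words.foldl (fun d w => d.modify w 0 (· + 1)) (PySem.Dict.empty : PySem.Dict String Int)
    let max_count := (PySem.List.max? word_counts.values (fun x => x)).getD 0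
    decide ((3 : Int) * words.length < 10 * max_count)

-- ===== PORT B =====
-- loop body of Source B: cur extends or restarts the run, best keeps the longest run so far
def pvStep (cb : Int × Int) (p : String × String) : Int × Int :=
  let cur := if p.2 == p.1 then cb.1 + 1 else 1
  (cur, if cur > cb.2 then cur else cb.2)

def is_repetitive_response_py_alt (response_text : String) : Bool :=
  let words := PySem.Str.split₀ (PySem.Str.lower response_text)
  if words.length < 10 then false
  else
    let sw := PySem.List.sorted words (fun x => x) false
    let best := ((sw.zip sw.tail).foldl pvStep (1, 1)).2
    decide ((3 : Int) * words.length < 10 * best)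

-- ===== PRECONDITION & SPEC =====
def Spec_is_repetitive_response_py (response_text : String) (out : Bool) : Prop := out = is_repetitive_response_py_alt response_text
instance (response_text : String) (out : Bool) : Decidable (Spec_is_repetitive_response_py response_text out) := by unfold Spec_is_repetitive_response_py; infer_instance

-- ===== CLAIM (what is proved, stated in full; the proofs are below) =====
def Claim_equal_is_repetitive_response_py : Prop := ∀ (response_text : String), Dom_is_repetitive_response_py response_text → Spec_is_repetitive_response_py response_text (is_repetitive_response_py response_text)

-- ===== LEMMAS AND PROOFS =====

def pvMC (l : List String) : Int :=
  (PySem.List.max? ((PySem.List.dedup l).map (fun v => (l.count v : Int))) (fun x => x)).getD 0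

lemma pvMC_spec {l : List String} (h : l ≠ []) :
    (∃ v ∈ l, pvMC l = (l.count v : Int)) ∧ (∀ v ∈ l, (l.count v : Int) ≤ pvMC l) := by
  have hd : PySem.List.dedup l ≠ [] := by
    obtain ⟨a, t, rfl⟩ := List.exists_cons_of_ne_nil h
    exact List.ne_nil_of_mem ((PySem.List.mem_dedup _ _).2 (List.mem_cons_self ..))
  have hL : ((PySem.List.dedup l).map (fun v => (l.count v : Int))) ≠ [] := by
    simpa using hd
  obtain ⟨m, hm⟩ : ∃ m, PySem.List.max? ((PySem.List.dedup l).map (fun v => (l.count v : Int))) (fun x => x) = some m := by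
    cases hmax : PySem.List.max? ((PySem.List.dedup l).map (fun v => (l.count v : Int))) (fun x => x) with
    | none => exact absurd ((PySem.List.max?_eq_none_iff _ _).1 hmax) hL
    | some m => exact ⟨m, rfl⟩
  have hMC : pvMC l = m := by simp only [pvMC, hm, Option.getD_some]
  constructor
  · obtain ⟨v, hv, hveq⟩ := List.mem_map.1 (PySem.List.max?_mem hm)
    exact ⟨v, (PySem.List.mem_dedup _ _).1 hv, by rw [hMC, ← hveq]⟩
  · intro v hv
    rw [hMC]
    exact PySem.List.max?_isMax hm _ (List.mem_map.2 ⟨v, (PySem.List.mem_dedup _ _).2 hv, rfl⟩)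

lemma le_pvMC {l : List String} {v : String} (hv : v ∈ l) : (l.count v : Int) ≤ pvMC l :=
  (pvMC_spec (List.ne_nil_of_mem hv)).2 v hv

lemma pvMC_pos {l : List String} (h : l ≠ []) : 1 ≤ pvMC l := by
  obtain ⟨a, t, rfl⟩ := List.exists_cons_of_ne_nil h
  have h1 : a ∈ a :: t := List.mem_cons_self ..
  have h2 := le_pvMC h1
  have hc : 0 < (a :: t).count a := List.count_pos_iff.2 h1
  omega

lemma pvMC_perm {l l' : List String} (hp : l.Perm l') : pvMC l = pvMC l' := by
  rcases eq_or_ne l [] with rfl | h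
  · rw [hp.nil_eq]
  · have h' : l' ≠ [] := by
      intro e; subst e; exact h hp.eq_nil
    apply le_antisymm
    · obtain ⟨v, hv, hveq⟩ := (pvMC_spec h).1
      rw [hveq, hp.count_eq]
      exact le_pvMC (hp.mem_iff.1 hv)
    · obtain ⟨v, hv, hveq⟩ := (pvMC_spec h').1
      rw [hveq, ← hp.count_eq]
      exact le_pvMC (hp.mem_iff.2 hv)

lemma pvMC_singleton (a : String) : pvMC [a] = 1 := by
  simp [pvMC, PySem.List.dedup, PySem.Set.ofList, PySem.Set.add, PySem.Set.empty, PySem.Set.contains, PySem.List.max?]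

lemma pvMC_append_singleton {q : List String} (h : q ≠ []) (w : String) :
    pvMC (q ++ [w]) = max (pvMC q) ((q.count w : Int) + 1) := by
  have hqw : q ++ [w] ≠ [] := by simp
  have hcw : (q ++ [w]).count w = q.count w + 1 := by
    simp [List.count_append]
  apply le_antisymm
  · obtain ⟨v, hv, hveq⟩ := (pvMC_spec hqw).1
    rcases eq_or_ne v w with rfl | hne
    · rw [hveq, hcw]; push_cast; exact le_max_right _ _
    · have hvq : v ∈ q := by
        rcases List.mem_append.1 hv with h1 | h1
        · exact h1
        · exact absurd (List.mem_singleton.1 h1) hne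
      have hcv : (q ++ [w]).count v = q.count v := by
        simp [List.count_append, Ne.symm hne]
      rw [hveq, hcv]
      exact le_trans (le_pvMC hvq) (le_max_left _ _)
  · apply max_le
    · obtain ⟨u, hu, hueq⟩ := (pvMC_spec h).1
      have : q.count u ≤ (q ++ [w]).count u := by simp [List.count_append]
      rw [hueq]
      exact le_trans (by exact_mod_cast this) (le_pvMC (List.mem_append_left _ hu))
    · have := le_pvMC (l := q ++ [w]) (v := w) (List.mem_append_right _ (List.mem_singleton_self w))
      rw [hcw] at this; push_cast at this; omega

lemma pv_run_invariant : ∀ (rest p : List String) (a : String),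
    ((p ++ a :: rest).Pairwise (fun x y : String => x ≤ y)) →
    (((a :: rest).zip rest).foldl pvStep (((p ++ [a]).count a : Int), pvMC (p ++ [a]))).2
      = pvMC (p ++ [a] ++ rest) := by
  intro rest
  induction rest with
  | nil => intro p a _; simp
  | cons w rest' ih =>
    intro p a hsort
    have hq : p ++ [a] ≠ [] := by simp
    have hassoc : p ++ a :: w :: rest' = (p ++ [a]) ++ w :: rest' := by simp
    have hsort' : ((p ++ [a]) ++ w :: rest').Pairwise (fun x y : String => x ≤ y) := by
      rw [← hassoc]; exact hsort
    have hmc := pvMC_append_singleton hq w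
    have hpos := pvMC_pos hq
    have hstep : pvStep (((p ++ [a]).count a : Int), pvMC (p ++ [a])) (a, w)
        = ((((p ++ [a] ++ [w]).count w : Int)), pvMC (p ++ [a] ++ [w])) := by
      rcases eq_or_ne w a with rfl | hne
      · have hcnt : (p ++ [w] ++ [w]).count w = (p ++ [w]).count w + 1 := by
          simp [List.count_append]
        refine Prod.ext_iff.2 ⟨?_, ?_⟩
        · simp [pvStep]; ring
        · simp only [pvStep, beq_self_eq_true, if_true, hmc]
          rcases max_cases (pvMC (p ++ [w])) (((p ++ [w]).count w : Int) + 1) with ⟨he, hc⟩ | ⟨he, hc⟩ <;>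
            · simp only [he]; split_ifs <;> omega
      · have hwa : ¬ (w ∈ p ++ [a]) := by
          intro hw
          have hle1 : w ≤ a := by
            rcases List.mem_append.1 hw with h1 | h1
            · exact (List.pairwise_append.1 hsort).2.2 w h1 a (List.mem_cons_self ..)
            · exact absurd (List.mem_singleton.1 h1) hne
          have hle2 : a ≤ w :=
            (List.pairwise_cons.1 (List.pairwise_append.1 hsort).2.1).1 w (List.mem_cons_self ..)
          exact hne (le_antisymm hle1 hle2)
        have hc0 : (p ++ [a]).count w = 0 := List.count_eq_zero.2 hwa
        have hcnt : (p ++ [a] ++ [w]).count w = 1 := by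
          rw [List.count_append, hc0]; simp
        have hbeq : (w == a) = false := by simp [hne]
        refine Prod.ext_iff.2 ⟨?_, ?_⟩
        · have hcp : List.count w p = 0 :=
            List.count_eq_zero.2 (fun hx => hwa (List.mem_append_left _ hx))
          have hcaw : List.count w [a, w] = 1 := by simp [Ne.symm hne]
          simp [pvStep, hbeq, hcp, hcaw]
        · simp only [pvStep, hbeq, hmc, hc0]
          norm_num
          omega
    have hzip : ((a :: w :: rest').zip (w :: rest')) = (a, w) :: ((w :: rest').zip rest') := by
      simp
    rw [hzip, List.foldl_cons, hstep]
    have hassoc2 : p ++ [a] ++ [w] = (p ++ [a]) ++ [w] := rfl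
    have := ih (p ++ [a]) w hsort'
    calc (List.foldl pvStep ((((p ++ [a] ++ [w]).count w : Int)), pvMC (p ++ [a] ++ [w])) ((w :: rest').zip rest')).2
        = pvMC ((p ++ [a]) ++ [w] ++ rest') := this
      _ = pvMC (p ++ [a] ++ (w :: rest')) := by simp

lemma pv_bestRun_eq {l : List String} (h : l ≠ [])
    (hs : l.Pairwise (fun x y : String => x ≤ y)) :
    ((l.zip l.tail).foldl pvStep (1, 1)).2 = pvMC l := by
  obtain ⟨a, t, rfl⟩ := List.exists_cons_of_ne_nil h
  have h1 : (([] ++ [a]).count a : Int) = 1 := by simp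
  have h2 : pvMC ([] ++ [a]) = 1 := by simpa using pvMC_singleton a
  have := pv_run_invariant t [] a (by simpa using hs)
  rw [h1, h2] at this
  simpa using this

lemma pv_maxcountA_eq (ws : List String) :
    (PySem.List.max?
      ((ws.foldl (fun d w => d.modify w 0 (· + 1)) (PySem.Dict.empty : PySem.Dict String Int)).values)
      (fun x => x)).getD 0 = pvMC ws := by
  have hctr : ws.foldl (fun d w => d.modify w 0 (· + 1)) (PySem.Dict.empty : PySem.Dict String Int)
      = PySem.Dict.counter ws := (PySem.Dict.counter_eq_foldl ws).symm
  rw [hctr]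
  have hvals : (PySem.Dict.counter ws).values
      = (PySem.Set.ofList ws).map (fun k => (ws.count k : Int)) := by
    show ((PySem.Dict.counter ws).items).map (·.2) = _
    rw [PySem.Dict.items_counter]
    simp [List.map_map, Function.comp]
  rw [hvals, pvMC, PySem.List.dedup_eq_ofList]

lemma pv_ports_agree (response_text : String) :
    is_repetitive_response_py response_text = is_repetitive_response_py_alt response_text := by
  unfold is_repetitive_response_py is_repetitive_response_py_alt
  set words := PySem.Str.split₀ (PySem.Str.lower response_text) with hw
  by_cases hlen : words.length < 10
  · simp [hlen]
  · simp only [hlen, if_false]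
    have hne : words ≠ [] := by
      intro e; rw [e] at hlen; simp at hlen
    have hsne : PySem.List.sorted words (fun x => x) false ≠ [] := by
      rw [Ne, PySem.List.sorted_eq_nil_iff]; exact hne
    have hpair : (PySem.List.sorted words (fun x => x) false).Pairwise (fun x y : String => x ≤ y) :=
      PySem.List.sorted_pairwise words (fun x => x)
    have hB : (((PySem.List.sorted words (fun x => x) false).zip
        (PySem.List.sorted words (fun x => x) false).tail).foldl pvStep (1, 1)).2 = pvMC words := by
      rw [pv_bestRun_eq hsne hpair]
      exact pvMC_perm (PySem.List.sorted_perm words (fun x => x) false)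
    rw [pv_maxcountA_eq, hB]

-- ===== VERDICT (by name: the statement is the Claim_ definition above) =====
theorem is_repetitive_response_py_spec : Claim_equal_is_repetitive_response_py := by
  intro response_text _
  exact pv_ports_agree response_text
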